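-- pv_equiv track=rewrite | github.com/ivannfd/Information-retrieval | search_project/core/index.py | _decompress_block
-- ===== SOURCE A (Python) =====
-- from typing import List, Tuple, Dict, Set
--
-- def _decompress_block(block_data: Tuple[int, List[int], List[int]]) -> List[int]:
--     """Декомпрессия одного блока."""
--     b, compressed_data, exceptions = block_data
--
--     if b == 0:
--         return []
--
--     result = []
--     exception_index = 0
--     mask = (1 << b) - 1
--
--     for num in compressed_data:
--         if num == mask and exception_index < len(exceptions):
--             result.append(exceptions[exception_index])
--             exception_index += 1
--         else:
--             result.append(num)
--
--     return result
-- ===== SOURCE B (Python) =====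
-- from typing import List, Tuple
--
-- def _decompress_block(block_data: Tuple[int, List[int], List[int]]) -> List[int]:
--     """Декомпрессия одного блока (search-and-splice: jump to each sentinel with
--     list.index, copy the clean segment by slicing, splice in the exception)."""
--     b, data, exceptions = block_data
--     if b == 0:
--         return []
--     mask = (1 << b) - 1
--     rest = data
--     out = []
--     for exc in exceptions:
--         if mask not in rest:
--             break
--         j = rest.index(mask)
--         out += rest[:j]
--         out.append(exc)
--         rest = rest[j + 1:]
--     return out + rest
-- ===== Notes on version B (the rewrite author's own statement) =====
-- stated objective: alternative
-- what changed: Replaces A's element-by-element scan with a running exception counter by a search-and-splice algorithm: the outer loop runs over the exceptions, each step jumps straight to the next sentinel with list.index, copies the clean segment with a slice, splices in the exception and continues on the remaining suffix (breaking when no sentinel is left).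
import Mathlib
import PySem

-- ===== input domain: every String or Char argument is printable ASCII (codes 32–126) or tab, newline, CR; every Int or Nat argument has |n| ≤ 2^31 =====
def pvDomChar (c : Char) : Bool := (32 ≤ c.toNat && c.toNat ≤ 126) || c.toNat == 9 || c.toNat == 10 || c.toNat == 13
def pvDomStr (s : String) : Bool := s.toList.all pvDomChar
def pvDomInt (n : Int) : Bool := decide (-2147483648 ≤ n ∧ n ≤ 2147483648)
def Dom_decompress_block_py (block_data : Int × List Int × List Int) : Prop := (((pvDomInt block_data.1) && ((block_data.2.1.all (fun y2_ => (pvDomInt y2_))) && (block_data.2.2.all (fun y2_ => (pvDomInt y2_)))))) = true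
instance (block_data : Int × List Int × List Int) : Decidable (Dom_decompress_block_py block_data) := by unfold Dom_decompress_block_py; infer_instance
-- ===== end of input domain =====

-- B replaces A's per-element scan (with a running exception counter) by a search-and-splice
-- loop over the exceptions using list.index and slices (alternative decomposition, same cost).

-- ===== PORT A =====
-- literal transliteration of A: early return for b == 0, then one pass with (result, exception_index) state
def decompress_block_py (block_data : Int × List Int × List Int) : List Int :=
  let b := block_data.1
  let compressed_data := block_data.2.1
  let exceptions := block_data.2.2
  if b = 0 then []
  else
    let mask : Int := (1 <<< b.toNat) - 1   -- (1 << b) - 1; exact for b ≥ 0 (Pre_ excludes b < 0, where Python raises)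
    let st := compressed_data.foldl (fun (s : List Int × Nat) num =>
      if num = mask ∧ s.2 < exceptions.length then
        (s.1 ++ [((PySem.List.pyGet? exceptions (s.2 : Int)).getD 0)], s.2 + 1)
      else (s.1 ++ [num], s.2)) ([], 0)
    st.1

-- ===== PORT B =====
-- Source B's loop over the exceptions: state (out, rest); each step either breaks (mask not in rest)
-- or splices out ++ rest[:j] ++ [exc] and continues on rest[j+1:]; the break / loop end returns out ++ rest
def pvGoB (mask : Int) : List Int → List Int → List Int → List Int
  | [], out, rest => out ++ rest
  | e :: es, out, rest =>
    if mask ∈ rest then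
      match PySem.List.index? rest mask with
      | some j => pvGoB mask es (out ++ PySem.List.slice rest none (some (j : Int)) ++ [e])
                    (PySem.List.slice rest (some ((j : Int) + 1)) none)
      | none => out ++ rest   -- unreachable: index succeeds when mask ∈ rest
    else out ++ rest

def decompress_block_py_alt (block_data : Int × List Int × List Int) : List Int :=
  let b := block_data.1
  let data := block_data.2.1
  let exceptions := block_data.2.2
  if b = 0 then []
  else
    let mask : Int := (1 <<< b.toNat) - 1
    pvGoB mask exceptions [] data

-- ===== PRECONDITION & SPEC =====
-- Pre_ excludes b < 0: there Python's (1 << b) raises ValueError (both A and B raise).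
def Pre_decompress_block_py (block_data : Int × List Int × List Int) : Prop := 0 ≤ block_data.1
instance (block_data : Int × List Int × List Int) : Decidable (Pre_decompress_block_py block_data) := by unfold Pre_decompress_block_py; infer_instance
def pvWitness_decompress_block_py : (Int × List Int × List Int) := (2, [3, 1, 3, 2], [10, 20])

def Spec_decompress_block_py (block_data : Int × List Int × List Int) (out : List Int) : Prop := out = decompress_block_py_alt block_data
instance (block_data : Int × List Int × List Int) (out : List Int) : Decidable (Spec_decompress_block_py block_data out) := by unfold Spec_decompress_block_py; infer_instance

-- ===== CLAIM (what is proved, stated in full; the proofs are below) =====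
def Claim_equal_decompress_block_py : Prop := ∀ (block_data : Int × List Int × List Int), Dom_decompress_block_py block_data → Pre_decompress_block_py block_data → Spec_decompress_block_py block_data (decompress_block_py block_data)

-- ===== LEMMAS AND PROOFS =====

-- common characterisation: replace masks front-to-back while exceptions remain
def pvSubst (mask : Int) : List Int → List Int → List Int
  | [], _ => []
  | n :: t, e =>
      if n = mask then
        match e with
        | [] => n :: pvSubst mask t []
        | x :: e' => x :: pvSubst mask t e'
      else n :: pvSubst mask t e

lemma pvSubst_nil (mask : Int) (t : List Int) : pvSubst mask t [] = t := by
  induction t with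
  | nil => rfl
  | cons n t ih => simp [pvSubst, ih]

lemma pvSubst_no_mask (mask : Int) (l : List Int) (e : List Int) (h : mask ∉ l) :
    pvSubst mask l e = l := by
  induction l with
  | nil => rfl
  | cons n t ih =>
    have hn : n ≠ mask := by intro hc; exact h (by simp [hc])
    simp [pvSubst, hn, ih (fun hm => h (by simp [hm]))]

lemma pvSubst_splice (mask : Int) (pre suf : List Int) (e : Int) (es : List Int)
    (h : mask ∉ pre) :
    pvSubst mask (pre ++ mask :: suf) (e :: es) = pre ++ e :: pvSubst mask suf es := by
  induction pre with
  | nil => simp [pvSubst]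
  | cons n t ih =>
    have hn : n ≠ mask := by intro hc; exact h (by simp [hc])
    simp [pvSubst, hn, ih (fun hm => h (by simp [hm]))]

-- A's fold computes pvSubst
lemma pvA_foldl (mask : Int) (exc : List Int) (data : List Int) :
    ∀ (acc : List Int) (i : Nat),
      (data.foldl (fun (s : List Int × Nat) num =>
        if num = mask ∧ s.2 < exc.length then
          (s.1 ++ [((PySem.List.pyGet? exc (s.2 : Int)).getD 0)], s.2 + 1)
        else (s.1 ++ [num], s.2)) (acc, i)).1
      = acc ++ pvSubst mask data (exc.drop i) := by
  induction data with
  | nil => intro acc i; simp [pvSubst]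
  | cons n t ih =>
    intro acc i
    simp only [List.foldl_cons]
    by_cases hc : n = mask ∧ i < exc.length
    · rw [if_pos hc, ih]
      have hdrop : exc.drop i = exc[i] :: exc.drop (i + 1) := List.drop_eq_getElem_cons hc.2
      have hget : (PySem.List.pyGet? exc (i : Int)).getD 0 = exc[i] := by
        simp [PySem.List.pyGet?, PySem.List.pyIdx?, hc.2]
      rw [hdrop, hget]
      simp [pvSubst, hc.1]
    · rw [if_neg hc, ih]
      by_cases hm : n = mask
      · have hi : ¬ i < exc.length := fun h => hc ⟨hm, h⟩
        have hdrop : exc.drop i = [] := List.drop_eq_nil_of_le (by omega)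
        rw [hdrop]
        simp [pvSubst, hm]
      · simp [pvSubst, hm]

-- B's search-and-splice loop computes pvSubst
lemma pvB_goB (mask : Int) (exc : List Int) :
    ∀ (out rest : List Int), pvGoB mask exc out rest = out ++ pvSubst mask rest exc := by
  induction exc with
  | nil => intro out rest; simp [pvGoB, pvSubst_nil]
  | cons e es ih =>
    intro out rest
    by_cases hm : mask ∈ rest
    · obtain ⟨j, hj⟩ := (PySem.List.index?_isSome_iff rest mask).2 hm |> Option.isSome_iff_exists.1
      obtain ⟨pre, suf, hrest, hlen, hnot⟩ := (PySem.List.index?_eq_some_iff rest mask j).1 hj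
      have htake : PySem.List.slice rest none (some (j : Int)) = pre := by
        rw [PySem.List.slice_to_natCast, hrest, ← hlen, List.take_left]
      have hdrop : PySem.List.slice rest (some ((j : Int) + 1)) none = suf := by
        have : ((j : Int) + 1) = ((j + 1 : Nat) : Int) := by push_cast; ring
        rw [this, PySem.List.slice_from_natCast, hrest, ← hlen]
        simp [List.drop_append]

      simp only [pvGoB, if_pos hm, hj, htake, hdrop, ih]
      rw [hrest, pvSubst_splice mask pre suf e es hnot]
      simp
    · simp [pvGoB, hm, pvSubst_no_mask mask rest (e :: es) hm]

-- ===== VERDICT (by name: the statement is the Claim_ definition above) =====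
theorem decompress_block_py_spec : Claim_equal_decompress_block_py := by
  intro ⟨b, data, exc⟩ _ _
  unfold Spec_decompress_block_py decompress_block_py decompress_block_py_alt
  by_cases hb : b = 0
  · simp [hb]
  · simp only [if_neg hb]
    rw [pvB_goB ((1 <<< b.toNat) - 1) exc [] data]
    have := pvA_foldl ((1 <<< b.toNat) - 1) exc data [] 0
    simpa using this
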